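-- pv_equiv track=rewrite | github.com/GhosTsTeeR/okfruitpy | app/prueba_algoritmos_v2.3/color_.py | establecer_color
-- ===== SOURCE A (Python) =====
-- def establecer_color(distancia):
--     deltaE = 100
--     resultado = -1
--     for i in range(len(distancia)):
--         if distancia[i] < deltaE:
--             deltaE = distancia[i]
--     for i in range(len(distancia)):
--         if distancia[i] == deltaE:
--             resultado = i
--     return resultado
-- ===== SOURCE B (Python) =====
-- def establecer_color(distancia):
--     best = 100
--     res = -1
--     for i, x in enumerate(distancia):
--         if x < best:
--             best = x
--             res = i
--         elif x == best:
--             res = i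
--     return res
-- ===== Notes on version B (the rewrite author's own statement) =====
-- stated objective: alternative
-- what changed: The two sequential passes (compute the capped minimum, then rescan for its last index) are fused into one enumerate loop that tracks the running best and its last matching index together.
import Mathlib
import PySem

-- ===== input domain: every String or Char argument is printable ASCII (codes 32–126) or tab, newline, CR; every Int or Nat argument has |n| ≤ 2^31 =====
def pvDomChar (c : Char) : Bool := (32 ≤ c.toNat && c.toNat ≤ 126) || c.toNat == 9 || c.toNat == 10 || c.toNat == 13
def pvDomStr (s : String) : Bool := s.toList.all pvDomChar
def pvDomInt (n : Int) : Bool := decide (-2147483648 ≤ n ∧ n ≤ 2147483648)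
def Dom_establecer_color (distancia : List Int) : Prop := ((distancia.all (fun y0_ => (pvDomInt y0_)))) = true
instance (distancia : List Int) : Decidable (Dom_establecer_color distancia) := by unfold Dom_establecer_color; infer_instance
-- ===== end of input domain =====

-- B fuses A's two passes (capped minimum, then last index of it) into one enumerate loop.

-- ===== PORT A =====
def establecer_color (distancia : List Int) : Int :=
  let deltaE : Int :=
    (PySem.List.pyRange 0 (PySem.List.len distancia) 1).foldl
      (fun d i => if PySem.List.pyGetD distancia i 0 < d then PySem.List.pyGetD distancia i 0 else d) 100
  (PySem.List.pyRange 0 (PySem.List.len distancia) 1).foldl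
    (fun r i => if PySem.List.pyGetD distancia i 0 == deltaE then i else r) (-1)

-- ===== PORT B =====
def establecer_color_alt (distancia : List Int) : Int :=
  let st :=
    (PySem.List.enumerate distancia 0).foldl
      (fun (st : Int × Int) p =>
        if p.2 < st.1 then (p.2, p.1)
        else if p.2 == st.1 then (st.1, p.1)
        else st) (100, -1)
  st.2

-- ===== PRECONDITION & SPEC =====
def Spec_establecer_color (distancia : List Int) (out : Int) : Prop := out = establecer_color_alt distancia
instance (distancia : List Int) (out : Int) : Decidable (Spec_establecer_color distancia out) := by unfold Spec_establecer_color; infer_instance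

-- ===== CLAIM (what is proved, stated in full; the proofs are below) =====
def Claim_equal_establecer_color : Prop := ∀ (distancia : List Int), Dom_establecer_color distancia → Spec_establecer_color distancia (establecer_color distancia)

-- ===== LEMMAS AND PROOFS =====

-- B's fused loop computes A's two folds: first component the capped running minimum,
-- second component the last index whose value equals that minimum.
theorem pv_fused_loop (xs : List Int) : ∀ (s b r : Int),
    (PySem.List.enumerate xs s).foldl
      (fun (st : Int × Int) p =>
        if p.2 < st.1 then (p.2, p.1)
        else if p.2 == st.1 then (st.1, p.1)
        else st) (b, r)
    = (xs.foldl (fun d x => if x < d then x else d) b,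
       (PySem.List.enumerate xs s).foldl
         (fun r p => if p.2 == xs.foldl (fun d x => if x < d then x else d) b then p.1 else r) r) := by
  induction xs using List.reverseRecOn with
  | nil => intro s b r; simp [PySem.List.enumerate]
  | append_singleton xs x ih =>
    intro s b r
    rw [PySem.List.enumerate_append]
    simp only [List.foldl_append, ih, PySem.List.enumerate, List.foldl_cons, List.foldl_nil]
    by_cases hlt : x < xs.foldl (fun d x => if x < d then x else d) b
    · simp [hlt]
    · by_cases heq : x = xs.foldl (fun d x => if x < d then x else d) b
      · simp [heq]
      · simp [hlt, heq]

theorem establecer_color_eq_alt (xs : List Int) :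
    establecer_color xs = establecer_color_alt xs := by
  unfold establecer_color establecer_color_alt
  rw [pv_fused_loop]
  rw [PySem.List.foldl_pyRange_zero_pyGetD xs 0 (fun d x => if x < d then x else d) 100]
  rw [PySem.List.enumerate_eq_map_pyRange xs 0, List.foldl_map]

-- ===== VERDICT (by name: the statement is the Claim_ definition above) =====
theorem establecer_color_spec : Claim_equal_establecer_color := by
  intro distancia _
  unfold Spec_establecer_color
  exact establecer_color_eq_alt distancia
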